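-- pv_equiv track=rewrite | github.com/serg-yalosovetsky/snake | temp.py | loop_last
-- ===== SOURCE A (Python) =====
-- from typing import Iterable, Tuple, TypeVar
--
-- T = TypeVar('T', int, float, complex)
--
-- def loop_last(values: Iterable[T]) -> Iterable[Tuple[bool, T]]:
--     """Iterate and generate a tuple with a flag for last value.
--     """
--     iter_values = iter(values)
--     try:
--         previous_value = next(iter_values)
--     except StopIteration:
--         return
--     for value in iter_values:
--         yield False, previous_value
--         previous_value = value
--     yield True, previous_value
-- ===== SOURCE B (Python) =====
-- def loop_last(values):
--     """Iterate and generate a tuple with a flag for last value."""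
--     vals = list(values)
--     n = len(vals)
--     for i, v in enumerate(vals):
--         yield (i == n - 1, v)
-- ===== Notes on version B (the rewrite author's own statement) =====
-- stated objective: simpler
-- what changed: B materializes the input and flags the last element by comparing each index with len-1, instead of A's one-step-ahead previous_value lookahead loop.
import Mathlib
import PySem

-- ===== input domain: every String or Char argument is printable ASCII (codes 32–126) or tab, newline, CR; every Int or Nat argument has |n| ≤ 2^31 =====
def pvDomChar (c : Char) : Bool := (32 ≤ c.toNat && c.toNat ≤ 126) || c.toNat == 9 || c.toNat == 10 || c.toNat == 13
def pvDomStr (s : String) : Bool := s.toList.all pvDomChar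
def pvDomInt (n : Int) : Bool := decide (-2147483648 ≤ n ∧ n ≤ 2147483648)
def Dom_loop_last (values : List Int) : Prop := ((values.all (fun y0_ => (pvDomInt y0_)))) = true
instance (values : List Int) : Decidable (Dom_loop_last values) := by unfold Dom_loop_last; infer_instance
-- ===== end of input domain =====

-- B flags the last element by index-vs-length comparison over an enumerated list instead of
-- A's one-step-ahead previous_value lookahead; objective: simpler. (Return value only: on a
-- finite list both yield the same sequence.)

-- ===== PORT A =====
-- the 'for value in iter_values' loop carrying previous_value, then the final 'yield True, previous_value'
def loopLastAux (prev : Int) (rest : List Int) : List (Bool × Int) :=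
  match rest with
  | [] => [(true, prev)]
  | x :: xs => (false, prev) :: loopLastAux x xs

def loop_last (values : List Int) : List (Bool × Int) :=
  match values with
  | [] => []            -- next() raised StopIteration: the generator returns nothing
  | v :: rest => loopLastAux v rest

-- ===== PORT B =====
def loop_last_alt (values : List Int) : List (Bool × Int) :=
  let n : Int := values.length
  (PySem.List.enumerate values).map (fun p => (p.1 == n - 1, p.2))

-- ===== PRECONDITION & SPEC =====
def Spec_loop_last (values : List Int) (out : List (Bool × Int)) : Prop := out = loop_last_alt values
instance (values : List Int) (out : List (Bool × Int)) : Decidable (Spec_loop_last values out) := by unfold Spec_loop_last; infer_instance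

-- ===== CLAIM (what is proved, stated in full; the proofs are below) =====
def Claim_equal_loop_last : Prop := ∀ (values : List Int), Dom_loop_last values → Spec_loop_last values (loop_last values)

-- ===== LEMMAS AND PROOFS =====
theorem loopLastAux_eq (rest : List Int) : ∀ (prev : Int) (s : Int),
    loopLastAux prev rest
      = (PySem.List.enumerate (prev :: rest) s).map (fun p => (p.1 == s + rest.length, p.2)) := by
  induction rest with
  | nil =>
    intro prev s
    simp [loopLastAux, PySem.List.enumerate_cons, PySem.List.enumerate_nil]
  | cons x xs ih =>
    intro prev s
    simp only [loopLastAux, PySem.List.enumerate_cons, List.map_cons, List.length_cons]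
    rw [ih x (s+1)]
    simp only [PySem.List.enumerate_cons, List.map_cons]
    push_cast
    refine List.cons_eq_cons.mpr ⟨?_, List.cons_eq_cons.mpr ⟨?_, ?_⟩⟩
    · have h : (s == s + ((xs.length:Int) + 1)) = false := by simp; omega
      rw [h]
    · have h : (s + 1 == s + ((xs.length:Int) + 1)) = (s + 1 == s + 1 + (xs.length:Int)) := by
        rw [Bool.eq_iff_iff]; simp only [beq_iff_eq]; omega
      rw [h]
    · apply List.map_congr_left
      intro p hp
      have h : (p.1 == s + ((xs.length:Int) + 1)) = (p.1 == s + 1 + (xs.length:Int)) := by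
        rw [Bool.eq_iff_iff]; simp only [beq_iff_eq]; omega
      rw [h]

-- ===== VERDICT (by name: the statement is the Claim_ definition above) =====
theorem loop_last_spec : Claim_equal_loop_last := by
  intro values _
  unfold Spec_loop_last loop_last loop_last_alt
  match values with
  | [] => simp [PySem.List.enumerate_nil]
  | v :: rest =>
    simp only [List.length_cons]
    rw [loopLastAux_eq rest v 0]
    apply List.map_congr_left
    intro p _
    have : (0 : Int) + rest.length = (rest.length + 1 : Nat) - 1 := by push_cast; ring
    rw [this]
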